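-- pv_equiv track=rewrite | github.com/lorr1/bootleg_data_prep | bootleg_data_prep/benchmarks/candidate_generators.py | get_proper_nouns_old
-- ===== SOURCE A (Python) =====
-- def get_proper_nouns_old(text):
--     nouns = []
--     words = text.split()
--     start = 0
--     i = 0
--     while i < len(words):
--         if words[i][0].isupper():
--             start_i = i
--             i += 1
--             while True and i < len(words):
--                 if words[i][0].isupper():
--                     i += 1
--                 else:
--                     break
--             nouns.append(' '.join(words[start_i: i]))
--             continue
--         i += 1
--     full_nouns = []
--     for noun in nouns:
--         full_nouns.append(noun)
--         for part in noun.split():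
--             full_nouns.append(part)
--     return list(set(full_nouns))
-- ===== SOURCE B (Python) =====
-- def get_proper_nouns_old(text):
--     result = set()
--     run = []
--
--     def flush():
--         if run:
--             result.add(' '.join(run))
--             result.update(run)
--             run.clear()
--
--     for w in text.split():
--         if w[0].isupper():
--             run.append(w)
--         else:
--             flush()
--     flush()
--     return list(result)
-- ===== Notes on version B (the rewrite author's own statement) =====
-- stated objective: simpler
-- what changed: Replaces A's index-advancing nested while loops plus a separate collect-then-expand pass (and final list(set(...))) with one fused left-to-right pass that keeps the current capitalized run in an accumulator and flushes its phrase and words directly into a set.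
import Mathlib
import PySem

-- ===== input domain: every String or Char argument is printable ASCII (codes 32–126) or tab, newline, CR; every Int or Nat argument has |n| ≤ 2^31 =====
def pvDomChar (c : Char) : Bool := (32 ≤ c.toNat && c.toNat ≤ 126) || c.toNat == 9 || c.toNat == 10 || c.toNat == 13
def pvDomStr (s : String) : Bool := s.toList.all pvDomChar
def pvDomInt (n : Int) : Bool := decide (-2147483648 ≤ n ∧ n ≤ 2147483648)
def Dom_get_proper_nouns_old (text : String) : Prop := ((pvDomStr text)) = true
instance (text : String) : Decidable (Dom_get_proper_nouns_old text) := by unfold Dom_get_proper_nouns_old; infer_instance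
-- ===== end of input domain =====

-- B replaces A's nested index-advancing while loops plus a second collect-then-expand pass
-- by one fused scan that keeps the current capitalized run and flushes phrase+words into a set (simpler).
-- The final Python 'list(set(...))' is ported as PySem.Set.ofList; the output list is compared as a set.

-- ===== PORT A =====
-- words[i][0].isupper(); tokens of str.split() are always nonempty, so the none arm is unreachable
def pvHeadUpper (w : String) : Bool :=
  match PySem.Str.pyGet? w 0 with
  | some c => PySem.Chars.isupper c
  | none => false

-- inner 'while True and i < len(words): if words[i][0].isupper(): i += 1 else: break'
def pvA_inner (words : List String) (i : Nat) : Nat :=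
  if h : i < words.length then
    if pvHeadUpper words[i] then pvA_inner words (i + 1) else i
  else i
termination_by words.length - i

-- termination fact the outer loop's recursion cites
theorem pvA_inner_ge (words : List String) (i : Nat) : i ≤ pvA_inner words i := by
  unfold pvA_inner
  split
  · split
    · have := pvA_inner_ge words (i + 1); omega
    · omega
  · omega
termination_by words.length - i

-- outer while loop collecting nouns = joined runs
def pvA_outer (words : List String) (i : Nat) (nouns : List String) : List String :=
  if h : i < words.length then
    if pvHeadUpper words[i] then
      let j := pvA_inner words (i + 1)
      pvA_outer words j
        (nouns ++ [PySem.Str.join " " (PySem.List.slice words (some (i : Int)) (some (j : Int)))])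
    else pvA_outer words (i + 1) nouns
  else nouns
termination_by words.length - i
decreasing_by
  · have := pvA_inner_ge words (i + 1); omega
  · omega

-- 'for noun in nouns: full_nouns.append(noun); for part in noun.split(): full_nouns.append(part)'
def pvA_expand (nouns : List String) : List String :=
  nouns.foldl (fun acc noun =>
    (PySem.Str.split₀ noun).foldl (fun a part => a ++ [part]) (acc ++ [noun])) []

def get_proper_nouns_old (text : String) : List String :=
  PySem.Set.ofList (pvA_expand (pvA_outer (PySem.Str.split₀ text) 0 []))

-- ===== PORT B =====
-- flush(): if run: result.add(' '.join(run)); result.update(run); run.clear()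
def pvB_flush (result : PySem.Set String) (run : List String) : PySem.Set String :=
  if run.isEmpty then result
  else PySem.Set.update (PySem.Set.add result (PySem.Str.join " " run)) run

-- 'for w in text.split(): if w[0].isupper(): run.append(w) else: flush()'
def pvB_loop (ws : List String) (result : PySem.Set String) (run : List String) :
    PySem.Set String × List String :=
  match ws with
  | [] => (result, run)
  | w :: rest =>
    if pvHeadUpper w then pvB_loop rest result (run ++ [w])
    else pvB_loop rest (pvB_flush result run) []

def get_proper_nouns_old_alt (text : String) : List String :=
  let st := pvB_loop (PySem.Str.split₀ text) PySem.Set.empty []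
  pvB_flush st.1 st.2

-- ===== PRECONDITION & SPEC =====
def Spec_get_proper_nouns_old (text : String) (out : List String) : Prop := out = get_proper_nouns_old_alt text
instance (text : String) (out : List String) : Decidable (Spec_get_proper_nouns_old text out) := by unfold Spec_get_proper_nouns_old; infer_instance

-- ===== CLAIM (what is proved, stated in full; the proofs are below) =====
def Claim_equal_get_proper_nouns_old : Prop := ∀ (text : String), Dom_get_proper_nouns_old text → Spec_get_proper_nouns_old text (get_proper_nouns_old text)

-- ===== LEMMAS AND PROOFS =====

-- the sequence a completed run contributes: the joined phrase, then its words
def pvRunSeq (run : List String) : List String :=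
  if run.isEmpty then [] else PySem.Str.join " " run :: run

-- canonical contribution of the remaining words, given the pending run
def pvCanon : List String → List String → List String
  | [], run => pvRunSeq run
  | w :: rest, run =>
    if pvHeadUpper w then pvCanon rest (run ++ [w]) else pvRunSeq run ++ pvCanon rest []

-- a word is "clean": nonempty and whitespace-free (as all tokens of str.split() are)
def pvClean (w : List Char) : Prop := w ≠ [] ∧ ∀ c ∈ w, PySem.Chars.isspace c = false

theorem pv_go_clean (s : List Char) : ∀ (cur : List Char) (acc : List (List Char)),
    (∀ c ∈ cur, PySem.Chars.isspace c = false) → (∀ w ∈ acc, pvClean w) →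
    ∀ w ∈ PySem.Chars.split₀.go s cur acc, pvClean w := by
  induction s with
  | nil =>
    intro cur acc hcur hacc w hw
    simp only [PySem.Chars.split₀.go] at hw
    split at hw
    · exact hacc _ (by simpa using hw)
    · rename_i hne
      simp only [List.mem_reverse, List.mem_cons] at hw
      rcases hw with h | h
      · subst h
        refine ⟨by simpa using hne, ?_⟩
        intro c hc; exact hcur c (by simpa using hc)
      · exact hacc _ h
  | cons c rest ih =>
    intro cur acc hcur hacc w hw
    simp only [PySem.Chars.split₀.go] at hw
    split at hw
    · split at hw
      · exact ih [] acc (by simp) hacc w hw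
      · rename_i hne
        refine ih [] _ (by simp) ?_ w hw
        intro x hx
        rcases List.mem_cons.mp hx with h | h
        · subst h
          refine ⟨by simpa using hne, fun d hd => hcur d (by simpa using hd)⟩
        · exact hacc _ h
    · rename_i hsp
      refine ih (c :: cur) acc ?_ hacc w hw
      intro d hd
      rcases List.mem_cons.mp hd with h | h
      · subst h; simpa using hsp
      · exact hcur d h

theorem pv_words_clean (s : String) : ∀ w ∈ PySem.Str.split₀ s, pvClean w.toList := by
  intro w hw
  simp only [PySem.Str.split₀, List.mem_map] at hw
  obtain ⟨cs, hcs, rfl⟩ := hw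
  rw [String.toList_ofList]
  exact pv_go_clean _ [] [] (by simp) (by simp) cs hcs

theorem pv_go_append (cs rest cur : List Char) (acc : List (List Char))
    (h : ∀ c ∈ cs, PySem.Chars.isspace c = false) :
    PySem.Chars.split₀.go (cs ++ rest) cur acc = PySem.Chars.split₀.go rest (cs.reverse ++ cur) acc := by
  induction cs generalizing cur with
  | nil => simp
  | cons c t ih =>
    simp only [List.cons_append, PySem.Chars.split₀.go]
    rw [if_neg (by simpa using h c (by simp))]
    rw [ih (c :: cur) (fun d hd => h d (by simp [hd]))]
    simp

theorem pv_join_split_chars (ws : List (List Char)) (h : ∀ w ∈ ws, pvClean w) :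
    ∀ acc, PySem.Chars.split₀.go (PySem.Chars.join [' '] ws) [] acc = acc.reverse ++ ws := by
  induction ws with
  | nil => intro acc; simp [PySem.Chars.join, List.intercalate, PySem.Chars.split₀.go]
  | cons w rest ih =>
    intro acc
    obtain ⟨hne, hcl⟩ := h w (by simp)
    cases rest with
    | nil =>
      have hj : PySem.Chars.join [' '] [w] = w ++ [] := by
        simp [PySem.Chars.join, List.intercalate]
      rw [hj, pv_go_append w [] [] acc hcl]
      simp only [PySem.Chars.split₀.go, List.append_nil]
      rw [if_neg (by simpa using hne)]
      simp
    | cons y t =>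
      have hjoin : PySem.Chars.join [' '] (w :: y :: t) = w ++ (' ' :: PySem.Chars.join [' '] (y :: t)) := by
        simp [PySem.Chars.join, List.intercalate, List.intersperse]
      rw [hjoin, pv_go_append w _ [] acc hcl]
      simp only [PySem.Chars.split₀.go]
      rw [if_pos (by decide)]
      rw [if_neg (by simpa using hne)]
      simp only [List.append_nil]
      rw [ih (fun x hx => h x (by simp [hx])) (w.reverse.reverse :: acc)]
      simp

theorem pv_roundtrip (ws : List String) (h : ∀ w ∈ ws, pvClean w.toList) :
    PySem.Str.split₀ (PySem.Str.join " " ws) = ws := by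
  have hcl : ∀ w ∈ ws.map String.toList, pvClean w := by
    intro w hw
    obtain ⟨x, hx, rfl⟩ := List.mem_map.mp hw
    exact h x hx
  simp only [PySem.Str.split₀, PySem.Str.join, String.toList_ofList]
  have : (" ").toList = [' '] := by decide
  rw [this, show PySem.Chars.split₀ (PySem.Chars.join [' '] (ws.map String.toList))
        = PySem.Chars.split₀.go (PySem.Chars.join [' '] (ws.map String.toList)) [] [] from rfl,
      pv_join_split_chars _ hcl []]
  simp [List.map_map, Function.comp_def]

theorem pvA_expand_eq (ns : List String) :
    pvA_expand ns = ns.flatMap (fun n => n :: PySem.Str.split₀ n) := by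
  unfold pvA_expand
  have step : ∀ (acc : List String) (noun : String),
      (PySem.Str.split₀ noun).foldl (fun a part => a ++ [part]) (acc ++ [noun])
        = acc ++ (noun :: PySem.Str.split₀ noun) := by
    intro acc noun
    rw [PySem.List.foldl_append_singleton]
    simp
  induction ns using List.reverseRecOn with
  | nil => simp
  | append_singleton t x ih =>
    rw [List.foldl_append, List.foldl_cons, List.foldl_nil, step, ih]
    simp

theorem pvB_flush_eq (result : PySem.Set String) (run : List String) :
    pvB_flush result run = PySem.Set.update result (pvRunSeq run) := by
  unfold pvB_flush pvRunSeq
  split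
  · rfl
  · rfl

theorem pvB_loop_canon (ws : List String) : ∀ (result : PySem.Set String) (run : List String),
    pvB_flush (pvB_loop ws result run).1 (pvB_loop ws result run).2
      = PySem.Set.update result (pvCanon ws run) := by
  induction ws with
  | nil => intro result run; simp [pvB_loop, pvB_flush_eq, pvCanon]
  | cons w rest ih =>
    intro result run
    simp only [pvB_loop, pvCanon]
    split
    · exact ih result (run ++ [w])
    · rw [ih (pvB_flush result run) [], pvB_flush_eq]
      simp [PySem.Set.update, List.foldl_append]

theorem pvCanon_absorb (R : List String) (rest : List String)
    (hR : ∀ w ∈ R, pvHeadUpper w = true) :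
    ∀ run, pvCanon (R ++ rest) run = pvCanon rest (run ++ R) := by
  induction R with
  | nil => intro run; simp
  | cons x t ih =>
    intro run
    simp only [List.cons_append, pvCanon]
    rw [if_pos (hR x (by simp))]
    rw [ih (fun w hw => hR w (by simp [hw])) (run ++ [x])]
    simp

theorem pvCanon_flush (rest : List String) (run : List String)
    (h : rest = [] ∨ ∃ x t, rest = x :: t ∧ pvHeadUpper x = false) :
    pvCanon rest run = pvRunSeq run ++ pvCanon rest [] := by
  rcases h with rfl | ⟨x, t, rfl, hx⟩
  · simp [pvCanon, pvRunSeq]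
  · simp only [pvCanon, if_neg (by simp [hx] : ¬ pvHeadUpper x = true)]
    simp [pvRunSeq]

theorem pvA_inner_spec (words : List String) (i : Nat) (hi : i ≤ words.length) :
    i ≤ pvA_inner words i ∧ pvA_inner words i ≤ words.length ∧
    (∀ k, i ≤ k → k < pvA_inner words i → pvHeadUpper (words.getD k "") = true) ∧
    (pvA_inner words i < words.length → pvHeadUpper (words.getD (pvA_inner words i) "") = false) := by
  unfold pvA_inner
  split
  · rename_i h
    split
    · rename_i hup
      obtain ⟨h1, h2, h3, h4⟩ := pvA_inner_spec words (i + 1) (by omega)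
      refine ⟨by omega, h2, ?_, h4⟩
      intro k hk1 hk2
      rcases Nat.eq_or_lt_of_le hk1 with rfl | hk
      · rw [List.getD_eq_getElem _ _ h]; assumption
      · exact h3 k (by omega) hk2
    · rename_i hup
      refine ⟨le_refl _, by omega, by omega, ?_⟩
      intro _
      rw [List.getD_eq_getElem _ _ h]
      simpa using hup
  · exact ⟨le_refl _, by omega, by omega, by omega⟩
termination_by words.length - i

theorem pvA_outer_canon (words : List String) (hw : ∀ w ∈ words, pvClean w.toList)
    (i : Nat) (hi : i ≤ words.length) : ∀ (nouns : List String),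
    pvA_expand (pvA_outer words i nouns) = pvA_expand nouns ++ pvCanon (words.drop i) [] := by
  intro nouns
  unfold pvA_outer
  split
  · rename_i h
    split
    · rename_i hup
      obtain ⟨h1, h2, h3, h4⟩ := pvA_inner_spec words (i + 1) (by omega)
      generalize hj : pvA_inner words (i + 1) = j at h1 h2 h3 h4 ⊢
      have hslice : PySem.List.slice words (some (i : Int)) (some (j : Int))
          = (words.drop i).take (j - i) := by
        rw [PySem.List.slice_toNat words (by positivity) (by positivity)]
        simp
      have hdec : words.drop i = (words.drop i).take (j - i) ++ words.drop j := by
        conv_lhs => rw [← List.take_append_drop (j - i) (words.drop i)]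
        rw [List.drop_drop]
        have hij : i + (j - i) = j := by omega
        rw [hij]
      have hRup : ∀ w ∈ (words.drop i).take (j - i), pvHeadUpper w = true := by
        intro w hwmem
        obtain ⟨k, hk, rfl⟩ := List.mem_iff_getElem.mp hwmem
        have hkj : k < j - i := by simp at hk; omega
        have hik : i + k < words.length := by simp at hk; omega
        have hgk : ((words.drop i).take (j - i))[k] = words[i + k] := by
          simp [List.getElem_take, List.getElem_drop]
        rw [hgk]
        rcases Nat.eq_zero_or_pos k with rfl | hkpos
        · simpa using hup
        · have := h3 (i + k) (by omega) (by omega)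
          rwa [List.getD_eq_getElem _ _ hik] at this
      have hRne : (words.drop i).take (j - i) ≠ [] := by
        intro hnil
        have := congrArg List.length hnil
        simp at this
        omega
      have hround : PySem.Str.split₀ (PySem.Str.join " " ((words.drop i).take (j - i)))
          = (words.drop i).take (j - i) := by
        refine pv_roundtrip _ ?_
        intro w hwmem
        exact hw w (List.drop_subset i words (List.take_subset _ _ hwmem))
      have IH := pvA_outer_canon words hw j h2
        (nouns ++ [PySem.Str.join " " (PySem.List.slice words (some (i : Int)) (some (j : Int)))])
      have hnext : words.drop j = [] ∨
          ∃ x t, words.drop j = x :: t ∧ pvHeadUpper x = false := by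
        cases hdj : words.drop j with
        | nil => exact Or.inl rfl
        | cons x t =>
          refine Or.inr ⟨x, t, rfl, ?_⟩
          have hjlt : j < words.length := by
            by_contra hge
            have : words.drop j = [] := List.drop_eq_nil_of_le (by omega)
            rw [this] at hdj; exact absurd hdj (by simp)
          have hx : words[j]? = some x := by
            have := congrArg List.head? hdj
            rwa [List.head?_drop, List.head?_cons] at this
          rw [List.getElem?_eq_getElem hjlt] at hx
          have := h4 hjlt
          rw [List.getD_eq_getElem _ _ hjlt] at this
          rw [← Option.some_inj.mp hx]
          exact this
      have hcanon : pvCanon (words.drop i) [] =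
          PySem.Str.join " " ((words.drop i).take (j - i)) ::
            ((words.drop i).take (j - i) ++ pvCanon (words.drop j) []) := by
        conv_lhs => rw [hdec]
        rw [pvCanon_absorb _ _ hRup [], List.nil_append,
            pvCanon_flush (words.drop j) _ hnext, pvRunSeq]
        rw [if_neg (fun hemp => hRne (List.isEmpty_iff.mp hemp))]
        simp
      rw [IH, hslice, pvA_expand_eq, pvA_expand_eq, List.flatMap_append]
      simp only [List.flatMap_cons, List.flatMap_nil, List.append_nil]
      rw [hround, ← pvA_expand_eq, hcanon]
      simp
    · rename_i hup
      have IH := pvA_outer_canon words hw (i + 1) (by omega) nouns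
      rw [IH]
      congr 1
      have hdrop : words.drop i = words[i] :: words.drop (i + 1) :=
        List.drop_eq_getElem_cons h
      rw [hdrop]
      simp only [pvCanon]
      rw [if_neg (by simpa using hup)]
      simp [pvRunSeq]
  · rename_i h
    have : words.drop i = [] := List.drop_eq_nil_of_le (by omega)
    rw [this]
    simp [pvCanon, pvRunSeq, pvA_expand_eq]
termination_by words.length - i
decreasing_by
  all_goals omega

-- ===== VERDICT (by name: the statement is the Claim_ definition above) =====
theorem get_proper_nouns_old_spec : Claim_equal_get_proper_nouns_old := by
  intro text _
  unfold Spec_get_proper_nouns_old get_proper_nouns_old get_proper_nouns_old_alt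
  rw [pvB_loop_canon, pvA_outer_canon (PySem.Str.split₀ text) (pv_words_clean text) 0 (by omega)]
  rfl
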